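-- pv_equiv track=rewrite | github.com/Soohee410/Algorithm-in-Python | BOJ/Bronze/2292.py | Search_bee
-- ===== SOURCE A (Python) =====
-- def Search_bee(N):
--   start, end = 1, 19000
--
--   while start<= end:
--     mid = (start+end)//2
--     lb = 3*(mid**2)-3*mid+1
--     ub = lb + 6*mid
--
--     if N > lb and N <= ub:
--       return mid+1
--     elif N == lb :
--       return mid
--     elif N < lb:
--       end = mid
--     else:
--       start = mid
-- ===== SOURCE B (Python) =====
-- def Search_bee(N):
--   ring, last = 1, 1
--   while N > last:
--     ring += 1
--     last += 6 * (ring - 1)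
--   return ring
-- ===== Notes on version B (the rewrite author's own statement) =====
-- stated objective: simpler
-- what changed: Replaced the hand-rolled binary search over a fixed ring range [1,19000] with a short linear accumulation that walks outward ring by ring (last cell of ring r is 3r^2-3r+1) until it reaches N, which also terminates on every integer input.
import Mathlib
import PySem

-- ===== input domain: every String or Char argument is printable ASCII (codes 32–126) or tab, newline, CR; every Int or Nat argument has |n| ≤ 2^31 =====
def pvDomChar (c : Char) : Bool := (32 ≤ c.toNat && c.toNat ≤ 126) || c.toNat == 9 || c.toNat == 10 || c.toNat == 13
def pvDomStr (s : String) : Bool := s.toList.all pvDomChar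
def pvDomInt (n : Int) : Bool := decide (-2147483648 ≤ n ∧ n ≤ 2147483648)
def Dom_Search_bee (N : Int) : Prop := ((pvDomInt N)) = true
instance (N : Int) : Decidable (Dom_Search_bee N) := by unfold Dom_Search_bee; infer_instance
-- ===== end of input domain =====

-- B replaces A's fixed-range binary search with a linear ring-by-ring accumulation (simpler; terminates on all inputs; Pre_ excludes inputs where A loops forever).


-- ===== PORT A =====
-- A's while-loop, transcribed with fuel for totality; inside Pre_ the fuel is never exhausted
-- (the interval [start,end] strictly shrinks each iteration, width starts at 18999).
def Search_bee_loopA (N : Int) : Nat → Int → Int → Option Int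
  | 0, _, _ => none
  | fuel + 1, start, end_ =>
    if start ≤ end_ then
      let mid := PySem.Int.floordiv (start + end_) 2
      let lb := 3 * (mid ^ 2) - 3 * mid + 1
      let ub := lb + 6 * mid
      if N > lb ∧ N ≤ ub then some (mid + 1)
      else if N = lb then some mid
      else if N < lb then Search_bee_loopA N fuel start mid
      else Search_bee_loopA N fuel mid end_
    else none

def Search_bee (N : Int) : Option Int := Search_bee_loopA N 20000 1 19000

-- ===== PORT B =====
-- B's while-loop, transcribed with fuel for totality; N.toNat + 1 iterations always suffice.
def Search_bee_loopB (N : Int) : Nat → Int → Int → Option Int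
  | 0, _, _ => none
  | fuel + 1, ring, last =>
    if N > last then Search_bee_loopB N fuel (ring + 1) (last + 6 * ((ring + 1) - 1))
    else some ring

def Search_bee_alt (N : Int) : Option Int := Search_bee_loopB N (N.toNat + 1) 1 1

-- ===== PRECONDITION & SPEC =====
-- Pre_ excludes exactly the inputs where Python A never returns: its binary search loops
-- forever for N < 1 and for N above the last cell of ring 19000 (3*19000^2 - 3*19000 + 1).
def Pre_Search_bee (N : Int) : Prop := 1 ≤ N ∧ N ≤ 1082943001
instance (N : Int) : Decidable (Pre_Search_bee N) := by unfold Pre_Search_bee; infer_instance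
def pvWitness_Search_bee : Int := (8)

def Spec_Search_bee (N : Int) (out : Option Int) : Prop := out = Search_bee_alt N
instance (N : Int) (out : Option Int) : Decidable (Spec_Search_bee N out) := by unfold Spec_Search_bee; infer_instance

-- ===== CLAIM (what is proved, stated in full; the proofs are below) =====
def Claim_equal_Search_bee : Prop := ∀ (N : Int), Dom_Search_bee N → Pre_Search_bee N → Spec_Search_bee N (Search_bee N)

-- ===== LEMMAS AND PROOFS =====

-- f r = 3r^2 - 3r + 1 is the index of the last cell of ring r.
def beeF (r : Int) : Int := 3 * r ^ 2 - 3 * r + 1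

lemma beeF_mono {a b : Int} (ha : 1 ≤ a) (hab : a ≤ b) : beeF a ≤ beeF b := by
  unfold beeF; nlinarith

lemma beeF_strict {a b : Int} (ha : 1 ≤ a) (hab : a < b) : beeF a < beeF b := by
  unfold beeF; nlinarith

lemma beeF_ge_self {r : Int} (hr : 1 ≤ r) : r ≤ beeF r := by
  unfold beeF; nlinarith

-- characterization of "r is the ring containing cell N"
def beeP (N r : Int) : Prop := 1 ≤ r ∧ N ≤ beeF r ∧ (r = 1 ∨ beeF (r - 1) < N)

lemma beeP_unique {N a b : Int} (hpa : beeP N a) (hpb : beeP N b) : a = b := by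
  obtain ⟨ha1, haN, haL⟩ := hpa
  obtain ⟨hb1, hbN, hbL⟩ := hpb
  by_contra hne
  rcases lt_or_gt_of_ne hne with h | h
  · -- a < b : beeF (b-1) < N ≤ beeF a ≤ beeF (b-1)
    rcases hbL with rfl | hbL
    · omega
    · have := beeF_mono ha1 (by omega : a ≤ b - 1); omega
  · rcases haL with rfl | haL
    · omega
    · have := beeF_mono hb1 (by omega : b ≤ a - 1); omega

lemma loopA_sound (N : Int) : ∀ (fuel : Nat) (s e : Int), 1 ≤ s → s ≤ e →
    beeF s ≤ N → N ≤ beeF e → (e - s).toNat < fuel →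
    ∃ r, Search_bee_loopA N fuel s e = some r ∧ beeP N r := by
  intro fuel
  induction fuel with
  | zero => intro s e _ _ _ _ hf; omega
  | succ k ih =>
    intro s e hs hse hsN hNe hf
    obtain ⟨m, hmm⟩ : ∃ m, PySem.Int.floordiv (s + e) 2 = m := ⟨_, rfl⟩
    have hmid := PySem.Int.floordiv_eq_ediv_of_pos (a := s + e) (b := 2) (by omega)
    rw [hmm] at hmid
    have hsm : s ≤ m := by omega
    have hme : m ≤ e := by omega
    have hm1 : 1 ≤ m := by omega
    simp only [Search_bee_loopA, if_pos hse, hmm]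
    have hlb : 3 * (m ^ 2) - 3 * m + 1 = beeF m := by unfold beeF; ring
    have hub : 3 * (m ^ 2) - 3 * m + 1 + 6 * m = beeF (m + 1) := by unfold beeF; ring
    by_cases h1 : N > 3 * (m ^ 2) - 3 * m + 1 ∧ N ≤ 3 * (m ^ 2) - 3 * m + 1 + 6 * m
    · have hcan : beeF (m + 1 - 1) = beeF m := by norm_num
      refine ⟨m + 1, by simp [h1], by omega, by omega, Or.inr (by omega)⟩
    · rw [if_neg h1]
      by_cases h2 : N = 3 * (m ^ 2) - 3 * m + 1
      · refine ⟨m, by simp [h2], hm1, by omega, ?_⟩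
        by_cases hm1' : m = 1
        · exact Or.inl hm1'
        · exact Or.inr (by have := beeF_strict (a := m - 1) (b := m) (by omega) (by omega); omega)
      · rw [if_neg h2]
        by_cases h3 : N < 3 * (m ^ 2) - 3 * m + 1
        · rw [if_pos h3]
          -- here beeF s ≤ N < beeF m, so s < m, hence also m < e
          have hsm' : s < m := by
            by_contra hc
            have : m = s := by omega
            subst this
            omega
          have hme' : m < e := by omega
          exact ih s m hs (by omega) hsN (by omega) (by omega)
        · rw [if_neg h3]
          -- here beeF (m+1) < N ≤ beeF e, so m < e and s < m
          have hNm1 : beeF (m + 1) < N := by omega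
          have hsm' : s < m := by
            by_contra hc
            have hms : m = s := by omega
            have he : e ≤ m + 1 := by omega
            have := beeF_mono (a := e) (b := m + 1) (by omega) he
            omega
          exact ih m e hm1 (by omega) (by omega) hNe (by omega)

lemma loopB_sound (N : Int) : ∀ (fuel : Nat) (ring last : Int), 1 ≤ ring →
    last = beeF ring → (ring = 1 ∨ beeF (ring - 1) < N) → (N - ring).toNat < fuel →
    ∃ r, Search_bee_loopB N fuel ring last = some r ∧ beeP N r := by
  intro fuel
  induction fuel with
  | zero => intro _ _ _ _ _ hf; omega
  | succ k ih =>
    intro ring last hr hl hlo hf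
    rw [Search_bee_loopB]
    by_cases h : N > last
    · rw [if_pos h]
      have hnext : last + 6 * ((ring + 1) - 1) = beeF (ring + 1) := by
        subst hl; unfold beeF; ring
      have hge := beeF_ge_self hr
      have hlow : beeF ((ring + 1) - 1) < N := by
        have : beeF (ring + 1 - 1) = beeF ring := by norm_num
        omega
      exact ih (ring + 1) _ (by omega) hnext (Or.inr hlow) (by omega)
    · rw [if_neg h]
      exact ⟨ring, rfl, hr, by omega, hlo⟩

-- ===== VERDICT (by name: the statement is the Claim_ definition above) =====
theorem Search_bee_spec : Claim_equal_Search_bee := by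
  intro N _ hPre
  obtain ⟨h1, h2⟩ := hPre
  unfold Spec_Search_bee Search_bee Search_bee_alt
  obtain ⟨ra, hA, hPa⟩ := loopA_sound N 20000 1 19000 (by omega) (by omega)
    (by unfold beeF; omega) (by unfold beeF; omega) (by omega)
  obtain ⟨rb, hB, hPb⟩ := loopB_sound N (N.toNat + 1) 1 1 (by omega)
    (by unfold beeF; ring) (Or.inl rfl) (by omega)
  rw [hA, hB, beeP_unique hPa hPb]
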